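-- pv_equiv track=rewrite | github.com/HillSide2026/ll-secondbrain | 00_SYSTEM/scripts/scan_citt_updates.py | build_snippets
-- ===== SOURCE A (Python) =====
-- from typing import Dict, List, Optional
--
-- def build_snippets(lines: List[str], keywords: List[str], max_matches: int = 5) -> List[str]:
--     lowered_keywords = [keyword.lower() for keyword in keywords]
--     snippets: List[str] = []
--     seen = set()
--     for line in lines:
--         lowered_line = line.lower()
--         if not any(keyword in lowered_line for keyword in lowered_keywords):
--             continue
--         snippet = line
--         if snippet not in seen:
--             seen.add(snippet)
--             snippets.append(snippet)
--         if len(snippets) >= max_matches: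
--             break
--     return snippets
-- ===== SOURCE B (Python) =====
-- from typing import List
--
--
-- def build_snippets(lines: List[str], keywords: List[str], max_matches: int = 5) -> List[str]:
--     # Pass 1: keyword-outer scan building the set of matching line indices,
--     # replacing A's per-line any() scan with a precomputed index set.
--     matched = set()
--     for keyword in keywords:
--         k = keyword.lower()
--         for i, line in enumerate(lines):
--             if k in line.lower():
--                 matched.add(i)
--     # Pass 2: walk the indices once, collecting unseen matched lines;
--     # the cap is checked before appending.
--     snippets: List[str] = []
--     seen = set()
--     i = 0
--     while i < len(lines) and len(snippets) < max_matches: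
--         line = lines[i]
--         if i in matched and line not in seen:
--             seen.add(line)
--             snippets.append(line)
--         i += 1
--     return snippets
-- ===== Notes on version B (the rewrite author's own statement) =====
-- stated objective: alternative
-- what changed: B inverts the traversal: a keyword-outer pass precomputes the set of matching line indices (A's per-line any()-over-keywords inner scan disappears), then a single index walk collects unseen matched lines with the cap checked before appending instead of A's append-then-break.
-- intended difference: When max_matches <= 0 and some line contains a keyword (case-insensitively), A still returns a one-element list with the first matching line because it checks the cap only after appending, while B returns [], the intended meaning of a non-positive cap. — e.g. on build_snippets(["foo"], ["foo"], 0): A returns ["foo"], B returns []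
import Mathlib
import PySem

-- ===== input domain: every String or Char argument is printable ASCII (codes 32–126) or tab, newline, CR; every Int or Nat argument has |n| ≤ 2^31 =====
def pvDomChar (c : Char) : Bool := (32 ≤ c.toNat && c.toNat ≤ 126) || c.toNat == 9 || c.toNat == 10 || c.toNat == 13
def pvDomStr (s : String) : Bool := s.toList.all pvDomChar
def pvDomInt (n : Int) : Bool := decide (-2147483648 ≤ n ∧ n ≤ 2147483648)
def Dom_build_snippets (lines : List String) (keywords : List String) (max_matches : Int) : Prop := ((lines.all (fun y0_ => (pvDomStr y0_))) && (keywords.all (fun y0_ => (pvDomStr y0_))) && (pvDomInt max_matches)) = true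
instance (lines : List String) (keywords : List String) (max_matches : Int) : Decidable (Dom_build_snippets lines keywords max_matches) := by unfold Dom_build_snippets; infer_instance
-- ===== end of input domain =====

-- B inverts the traversal (keyword-outer pass precomputing the set of matching line indices, then one
-- capped index walk, cap checked before appending) instead of A's line-outer loop with an inner any()
-- scan and append-then-break; on a non-positive cap with a matching line A still returns one line, B
-- returns [] — stated as D_ below.


-- ===== PORT A =====
-- the for-loop of A: state (snippets, seen), early 'break' = returning snippets
def buildLoopA (lowered_keywords : List String) (max_matches : Int) :
    List String → List String → PySem.Set String → List String
  | [], snippets, _ => snippets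
  | line :: rest, snippets, seen =>
    let lowered_line := PySem.Str.lower line
    if ¬ (lowered_keywords.any (fun keyword => PySem.Str.isIn keyword lowered_line)) then
      buildLoopA lowered_keywords max_matches rest snippets seen
    else
      let p :=
        if PySem.Set.contains seen line then (snippets, seen)
        else (snippets ++ [line], PySem.Set.add seen line)
      if max_matches ≤ (p.1.length : Int) then p.1
      else buildLoopA lowered_keywords max_matches rest p.1 p.2

def build_snippets (lines : List String) (keywords : List String) (max_matches : Int) : List String :=
  let lowered_keywords := keywords.map PySem.Str.lower
  buildLoopA lowered_keywords max_matches lines [] PySem.Set.empty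

-- ===== PORT B =====
-- pass 1 of B: for keyword in keywords: for i, line in enumerate(lines): if k in line.lower(): matched.add(i)
def matchedIdx (lines : List String) (keywords : List String) : PySem.Set Int :=
  keywords.foldl (fun matched keyword =>
    let k := PySem.Str.lower keyword
    (PySem.List.enumerate lines 0).foldl (fun m pr =>
      if PySem.Str.isIn k (PySem.Str.lower pr.2) then PySem.Set.add m pr.1 else m) matched)
    PySem.Set.empty

-- pass 2 of B: 'while i < len(lines) and len(snippets) < max_matches' walking (i, lines[i]) pairs
def collectB (matched : PySem.Set Int) (max_matches : Int) :
    List (Int × String) → List String → PySem.Set String → List String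
  | [], snippets, _ => snippets
  | (i, line) :: rest, snippets, seen =>
    if max_matches ≤ (snippets.length : Int) then snippets
    else if PySem.Set.contains matched i && !(PySem.Set.contains seen line) then
      collectB matched max_matches rest (snippets ++ [line]) (PySem.Set.add seen line)
    else
      collectB matched max_matches rest snippets seen

def build_snippets_alt (lines : List String) (keywords : List String) (max_matches : Int) : List String :=
  collectB (matchedIdx lines keywords) max_matches (PySem.List.enumerate lines 0) [] PySem.Set.empty

-- ===== PRECONDITION & SPEC =====
-- When max_matches ≤ 0 and some line contains a keyword (case-insensitively), A returns the first such
-- line (it checks the cap only after appending), while B returns []: a cap of zero or less should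
-- produce no snippets, so B's value is the intended one.
def D_build_snippets (lines : List String) (keywords : List String) (max_matches : Int) : Prop :=
  max_matches ≤ 0 ∧ ∃ line ∈ lines, ∃ keyword ∈ keywords,
    (PySem.Str.lower keyword).toList <:+: (PySem.Str.lower line).toList
instance (lines : List String) (keywords : List String) (max_matches : Int) : Decidable (D_build_snippets lines keywords max_matches) := by unfold D_build_snippets; infer_instance
def Spec_build_snippets (lines : List String) (keywords : List String) (max_matches : Int) (out : List String) : Prop := ¬ D_build_snippets lines keywords max_matches → out = build_snippets_alt lines keywords max_matches
instance (lines : List String) (keywords : List String) (max_matches : Int) (out : List String) : Decidable (Spec_build_snippets lines keywords max_matches out) := by unfold Spec_build_snippets; infer_instance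
def pvDiffWitness_build_snippets : List String × List String × Int := (["foo"], ["foo"], 0)
def pvDiffWitnessOut_build_snippets : (List String) × (List String) := (["foo"], [])

-- ===== CLAIM (what is proved, stated in full; the proofs are below) =====
def Claim_unchanged_build_snippets : Prop := ∀ (lines : List String) (keywords : List String) (max_matches : Int), Dom_build_snippets lines keywords max_matches → Spec_build_snippets lines keywords max_matches (build_snippets lines keywords max_matches)
def Claim_changed_build_snippets : Prop := Dom_build_snippets (pvDiffWitness_build_snippets.1) (pvDiffWitness_build_snippets.2.1) (pvDiffWitness_build_snippets.2.2) ∧ D_build_snippets (pvDiffWitness_build_snippets.1) (pvDiffWitness_build_snippets.2.1) (pvDiffWitness_build_snippets.2.2) ∧ build_snippets (pvDiffWitness_build_snippets.1) (pvDiffWitness_build_snippets.2.1) (pvDiffWitness_build_snippets.2.2) = pvDiffWitnessOut_build_snippets.1 ∧ build_snippets_alt (pvDiffWitness_build_snippets.1) (pvDiffWitness_build_snippets.2.1) (pvDiffWitness_build_snippets.2.2) = pvDiffWitnessOut_build_snippets.2 ∧ pvDiffWitnessOut_build_snippets.1 ≠ pvDiffWitnessOut_build_snippets.2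
def Claim_exact_build_snippets : Prop := ∀ (lines : List String) (keywords : List String) (max_matches : Int), Dom_build_snippets lines keywords max_matches → D_build_snippets lines keywords max_matches → build_snippets lines keywords max_matches ≠ build_snippets_alt lines keywords max_matches

-- ===== LEMMAS AND PROOFS =====

-- A's loop with the match predicate abstracted (proof helper)
def genLoop (p : String → Bool) (m : Int) : List String → List String → PySem.Set String → List String
  | [], snippets, _ => snippets
  | line :: rest, snippets, seen =>
    if ¬ p line then genLoop p m rest snippets seen
    else
      let pr :=
        if PySem.Set.contains seen line then (snippets, seen)
        else (snippets ++ [line], PySem.Set.add seen line)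
      if m ≤ (pr.1.length : Int) then pr.1
      else genLoop p m rest pr.1 pr.2

lemma buildLoopA_eq_gen (lowered : List String) (m : Int) (lines : List String) :
    ∀ (snippets : List String) (seen : PySem.Set String),
    buildLoopA lowered m lines snippets seen =
      genLoop (fun line => lowered.any (fun keyword => PySem.Str.isIn keyword (PySem.Str.lower line)))
        m lines snippets seen := by
  induction lines with
  | nil => intro _ _; rfl
  | cons line rest ih =>
    intro snippets seen
    simp only [buildLoopA, genLoop]
    split
    · exact ih _ _
    · split
      · split
        · rfl
        · exact ih _ _
      · split
        · rfl
        · exact ih _ _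

-- new unique elements of a list, relative to an already-seen set (proof helper)
def newUniq (seen : PySem.Set String) : List String → List String
  | [] => []
  | x :: xs => if x ∈ seen then newUniq seen xs else x :: newUniq (PySem.Set.add seen x) xs

lemma gen_eq_take (p : String → Bool) (m : Int) (lines : List String) :
    ∀ (snippets : List String) (seen : PySem.Set String),
    (snippets.length : Int) < m →
    genLoop p m lines snippets seen = (snippets ++ newUniq seen (lines.filter p)).take m.toNat := by
  induction lines with
  | nil =>
    intro snippets seen h
    have : snippets.length ≤ m.toNat := by omega
    simp [genLoop, newUniq, List.take_of_length_le this]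
  | cons line rest ih =>
    intro snippets seen h
    by_cases hp : p line
    · by_cases hseen : line ∈ seen
      · have hc : PySem.Set.contains seen line = true := by
          simpa [PySem.Set.contains_iff] using hseen
        have hnb : ¬ m ≤ (snippets.length : Int) := by omega
        simp [genLoop, hp, hnb, ih snippets seen h, newUniq, hseen]
      · have hc : PySem.Set.contains seen line = false := by
          simpa [PySem.Set.contains_iff] using hseen
        have hadd : PySem.Set.add seen line = seen ++ [line] := PySem.Set.add_of_not_mem hseen
        by_cases hstop : m ≤ ((snippets ++ [line]).length : Int)
        · have hm : m.toNat = (snippets ++ [line]).length := by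
            simp at hstop ⊢; omega
          simp only [genLoop, hp, not_true_eq_false, if_false, hc, Bool.false_eq_true,
            List.filter_cons]
          rw [if_pos hstop]
          have : (snippets ++ newUniq seen (line :: rest.filter p)) =
              (snippets ++ [line]) ++ newUniq (PySem.Set.add seen line) (rest.filter p) := by
            simp [newUniq, hseen]
          simp only [if_true] at *
          rw [this, hm, List.take_left]
        · have h' : ((snippets ++ [line]).length : Int) < m := by
            simp at hstop ⊢; omega
          have hrec := ih (snippets ++ [line]) (PySem.Set.add seen line) h'
          simp only [genLoop, hp, not_true_eq_false, if_false, hc, Bool.false_eq_true,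
            List.filter_cons]
          rw [if_neg hstop, hrec]
          simp [newUniq, hseen, List.append_assoc]
    · simp [genLoop, hp, ih snippets seen h]

-- no line matches: A's loop returns its accumulator unchanged
lemma gen_no_match (p : String → Bool) (m : Int) (lines : List String)
    (hl : ∀ line ∈ lines, p line = false) :
    ∀ (snippets : List String) (seen : PySem.Set String),
      genLoop p m lines snippets seen = snippets := by
  induction lines with
  | nil => intro _ _; rfl
  | cons line rest ih =>
    intro snippets seen
    have h1 := hl line (by simp)
    have h2 : ∀ l ∈ rest, p l = false := fun l hm => hl l (by simp [hm])
    simp [genLoop, h1, ih h2]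

-- the match predicate of the ports, spelled as the infix condition of D_
lemma any_isIn_iff (keywords : List String) (line : String) :
    ((keywords.map PySem.Str.lower).any
      (fun keyword => PySem.Str.isIn keyword (PySem.Str.lower line))) = true ↔
    ∃ keyword ∈ keywords, (PySem.Str.lower keyword).toList <:+: (PySem.Str.lower line).toList := by
  simp [List.any_eq_true, PySem.Chars.isIn_iff_infix, PySem.Str.lower]

-- non-positive cap and a matching line: A's loop returns a non-empty list
lemma gen_ne_nil (p : String → Bool) (m : Int) (hm : m ≤ 0) (lines : List String) :
    (∃ line ∈ lines, p line = true) →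
    genLoop p m lines [] PySem.Set.empty ≠ [] := by
  induction lines with
  | nil => rintro ⟨_, h, _⟩; cases h
  | cons line rest ih =>
    rintro ⟨l, hl, hmatch⟩
    by_cases hp : p line
    · have hstop : m ≤ ((([] : List String) ++ [line]).length : Int) := by simp; omega
      simp only [genLoop, hp, not_true_eq_false, if_false,
        show PySem.Set.contains PySem.Set.empty line = false from rfl, Bool.false_eq_true]
      rw [if_pos (by simpa using hstop)]
      simp
    · rcases List.mem_cons.mp hl with rfl | hl
      · exact absurd hmatch hp
      · simpa [genLoop, hp] using ih ⟨l, hl, hmatch⟩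

-- membership in B's matched-index set: some keyword matches some enumerated pair with that index
-- membership through one inner fold over the enumerated pairs
lemma mem_innerFold (k : String) (ps : List (Int × String)) :
    ∀ (acc : PySem.Set Int) (j : Int),
    (j ∈ ps.foldl (fun m pr =>
        if PySem.Str.isIn k (PySem.Str.lower pr.2) then PySem.Set.add m pr.1 else m) acc) ↔
      j ∈ acc ∨ ∃ pr ∈ ps, pr.1 = j ∧ PySem.Str.isIn k (PySem.Str.lower pr.2) := by
  induction ps with
  | nil => intro acc j; simp
  | cons pr rest ih =>
    intro acc j
    by_cases hp : PySem.Str.isIn k (PySem.Str.lower pr.2)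
    · simp only [List.foldl_cons, hp, if_true, ih, PySem.Set.mem_add]
      constructor
      · rintro (⟨h | rfl⟩ | ⟨q, hq, rfl, hqk⟩)
        · exact Or.inl h
        · exact Or.inr ⟨pr, by simp, rfl, hp⟩
        · exact Or.inr ⟨q, by simp [hq], rfl, hqk⟩
      · rintro (h | ⟨q, hq, rfl, hqk⟩)
        · exact Or.inl (Or.inl h)
        · rcases List.mem_cons.mp hq with rfl | hq
          · exact Or.inl (Or.inr rfl)
          · exact Or.inr ⟨q, hq, rfl, hqk⟩
    · simp only [List.foldl_cons, hp, ih]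
      constructor
      · rintro (h | ⟨q, hq, rfl, hqk⟩)
        · exact Or.inl h
        · exact Or.inr ⟨q, by simp [hq], rfl, hqk⟩
      · rintro (h | ⟨q, hq, rfl, hqk⟩)
        · exact Or.inl h
        · rcases List.mem_cons.mp hq with rfl | hq
          · exact absurd hqk hp
          · exact Or.inr ⟨q, hq, rfl, hqk⟩

-- membership in B's matched-index set: some keyword matches some enumerated pair with that index
lemma mem_matchedIdx (lines : List String) (keywords : List String) (j : Int) :
    j ∈ matchedIdx lines keywords ↔
      ∃ keyword ∈ keywords, ∃ pr ∈ PySem.List.enumerate lines 0,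
        pr.1 = j ∧ PySem.Str.isIn (PySem.Str.lower keyword) (PySem.Str.lower pr.2) := by
  have gen : ∀ (ks : List String) (acc : PySem.Set Int),
      (j ∈ ks.foldl (fun matched keyword =>
          let k := PySem.Str.lower keyword
          (PySem.List.enumerate lines 0).foldl (fun m pr =>
            if PySem.Str.isIn k (PySem.Str.lower pr.2) then PySem.Set.add m pr.1 else m) matched)
        acc) ↔
      j ∈ acc ∨ ∃ keyword ∈ ks, ∃ pr ∈ PySem.List.enumerate lines 0,
        pr.1 = j ∧ PySem.Str.isIn (PySem.Str.lower keyword) (PySem.Str.lower pr.2) := by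
    intro ks
    induction ks with
    | nil => intro acc; simp
    | cons kw rest ih =>
      intro acc
      simp only [List.foldl_cons, ih, mem_innerFold]
      constructor
      · rintro ((h | ⟨q, hq, rfl, hqk⟩) | ⟨k2, hk2, q, hq, rfl, hqk⟩)
        · exact Or.inl h
        · exact Or.inr ⟨kw, by simp, q, hq, rfl, hqk⟩
        · exact Or.inr ⟨k2, by simp [hk2], q, hq, rfl, hqk⟩
      · rintro (h | ⟨k2, hk2, q, hq, rfl, hqk⟩)
        · exact Or.inl (Or.inl h)
        · rcases List.mem_cons.mp hk2 with rfl | hk2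
          · exact Or.inl (Or.inr ⟨q, hq, rfl, hqk⟩)
          · exact Or.inr ⟨k2, hk2, q, hq, rfl, hqk⟩
  have h2 := gen keywords PySem.Set.empty
  simp only [PySem.Set.empty, List.not_mem_nil, false_or] at h2
  exact h2

-- for a genuine enumerated pair, membership of its index in matchedIdx is A's match predicate
lemma contains_matchedIdx (lines : List String) (keywords : List String)
    (pr : Int × String) (hpr : pr ∈ PySem.List.enumerate lines 0) :
    PySem.Set.contains (matchedIdx lines keywords) pr.1 =
      (keywords.map PySem.Str.lower).any (fun keyword => PySem.Str.isIn keyword (PySem.Str.lower pr.2)) := by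
  obtain ⟨k, hk, rfl⟩ := (PySem.List.mem_enumerate_iff _ _ _).mp hpr
  rcases hany : (keywords.map PySem.Str.lower).any
      (fun keyword => PySem.Str.isIn keyword (PySem.Str.lower lines[k])) with _ | _
  · -- no keyword matches: the index is not in the set
    rw [← Bool.not_eq_true, PySem.Set.contains_iff, mem_matchedIdx]
    rintro ⟨kw, hkw, q, hq, hfst, hmatch⟩
    obtain ⟨k2, hk2, rfl⟩ := (PySem.List.mem_enumerate_iff _ _ _).mp hq
    have hkk : k2 = k := by omega
    subst hkk
    have hfalse := List.any_eq_false.mp hany (PySem.Str.lower kw) (List.mem_map_of_mem hkw)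
    rw [hmatch] at hfalse
    exact absurd hfalse (by simp)
  · -- some keyword matches
    rw [PySem.Set.contains_iff, mem_matchedIdx]
    obtain ⟨kw0, hkw0, hm0⟩ := List.any_eq_true.mp hany
    obtain ⟨kw, hkw, rfl⟩ := List.mem_map.mp hkw0
    exact ⟨kw, hkw, (0 + (k : Int), lines[k]), hpr, rfl, hm0⟩

-- cap already reached: B's collector returns its accumulator
lemma collectB_stop (matched : PySem.Set Int) (m : Int) (ps : List (Int × String))
    (snippets : List String) (seen : PySem.Set String)
    (h : m ≤ (snippets.length : Int)) :
    collectB matched m ps snippets seen = snippets := by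
  cases ps with
  | nil => rfl
  | cons pr rest =>
    obtain ⟨i, line⟩ := pr
    simp [collectB, h]

-- B's collector, under the index/predicate correspondence, computes the capped unique matches
lemma collectB_eq_take (matched : PySem.Set Int) (p : String → Bool) (m : Int) :
    ∀ (ps : List (Int × String)) (snippets : List String) (seen : PySem.Set String),
    (∀ pr ∈ ps, PySem.Set.contains matched pr.1 = p pr.2) →
    (snippets.length : Int) < m →
    collectB matched m ps snippets seen =
      (snippets ++ newUniq seen ((ps.map Prod.snd).filter p)).take m.toNat := by
  intro ps
  induction ps with
  | nil =>
    intro snippets seen _ h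
    have : snippets.length ≤ m.toNat := by omega
    simp [collectB, newUniq, List.take_of_length_le this]
  | cons pr rest ih =>
    intro snippets seen H h
    obtain ⟨i, line⟩ := pr
    have hi : PySem.Set.contains matched i = p line := H (i, line) (by simp)
    have H' : ∀ q ∈ rest, PySem.Set.contains matched q.1 = p q.2 :=
      fun q hq => H q (by simp [hq])
    have hnb : ¬ m ≤ (snippets.length : Int) := by omega
    by_cases hp : p line
    · by_cases hseen : line ∈ seen
      · have hc : PySem.Set.contains seen line = true := by
          simpa [PySem.Set.contains_iff] using hseen
        simp [collectB, hnb, hp, ih _ _ H' h, newUniq, hseen]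
      · have hc : PySem.Set.contains seen line = false := by
          simpa [PySem.Set.contains_iff] using hseen
        by_cases hstop : m ≤ ((snippets ++ [line]).length : Int)
        · have hm : m.toNat = (snippets ++ [line]).length := by
            simp at hstop ⊢; omega
          simp only [collectB, hnb, if_false, hi, hp, hc, Bool.not_false, Bool.and_true,
            if_true, List.map_cons, List.filter_cons]
          rw [collectB_stop matched m rest _ _ (by simpa using hstop)]
          have : (snippets ++ newUniq seen (line :: (rest.map Prod.snd).filter p)) =
              (snippets ++ [line]) ++ newUniq (PySem.Set.add seen line) ((rest.map Prod.snd).filter p) := by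
            simp [newUniq, hseen]
          simp only [hp] at *
          rw [this, hm, List.take_left]
        · have h' : ((snippets ++ [line]).length : Int) < m := by
            simp at hstop ⊢; omega
          simp only [collectB, hnb, if_false, hi, hp, hc, Bool.not_false, Bool.and_true,
            if_true, List.map_cons, List.filter_cons]
          rw [ih _ _ H' h']
          simp [newUniq, hseen, List.append_assoc]
    · have hpf : p line = false := by simpa using hp
      have hnotmem : i ∉ matched := by
        intro hm
        have hct : PySem.Set.contains matched i = true := by
          simpa [PySem.Set.contains_iff] using hm
        rw [hi, hpf] at hct
        exact Bool.false_ne_true hct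
      simp [collectB, hnb, hnotmem, hpf, ih _ _ H' h]

-- non-positive cap: B's collector returns its (empty) accumulator at once
lemma collectB_nonpos (matched : PySem.Set Int) (m : Int) (hm : m ≤ 0)
    (ps : List (Int × String)) (seen : PySem.Set String) :
    collectB matched m ps [] seen = [] := by
  cases ps with
  | nil => rfl
  | cons pr rest =>
    obtain ⟨i, line⟩ := pr
    simp only [collectB, List.length_nil, Nat.cast_zero]
    rw [if_pos (by omega : m ≤ (0 : Int))]

-- ===== VERDICT (by name: the statement is the Claim_ definition above) =====
theorem build_snippets_spec : Claim_unchanged_build_snippets := by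
  intro lines keywords m _ hD
  simp only [build_snippets, build_snippets_alt]
  rw [buildLoopA_eq_gen]
  by_cases hm : 0 < m
  · rw [collectB_eq_take (matchedIdx lines keywords)
      (fun line => (keywords.map PySem.Str.lower).any
        (fun keyword => PySem.Str.isIn keyword (PySem.Str.lower line)))
      m (PySem.List.enumerate lines 0) [] PySem.Set.empty
      (fun pr hpr => contains_matchedIdx lines keywords pr hpr) (by simpa using hm)]
    rw [gen_eq_take _ m lines [] PySem.Set.empty (by simpa using hm)]
    rw [PySem.List.map_snd_enumerate]
  · rw [collectB_nonpos _ m (by omega)]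
    apply gen_no_match
    intro line hline
    by_contra hc
    apply hD
    refine ⟨by omega, line, hline, ?_⟩
    rw [← any_isIn_iff]
    simpa using hc

theorem build_snippets_changed : Claim_changed_build_snippets := by
  unfold Claim_changed_build_snippets; decide

theorem build_snippets_tight : Claim_exact_build_snippets := by
  intro lines keywords m _ hD
  obtain ⟨hm, line, hline, keyword, hkw, hinf⟩ := hD
  have hne : build_snippets lines keywords m ≠ [] := by
    simp only [build_snippets]
    rw [buildLoopA_eq_gen]
    exact gen_ne_nil _ m hm lines ⟨line, hline, (any_isIn_iff keywords line).2 ⟨keyword, hkw, hinf⟩⟩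
  have halt : build_snippets_alt lines keywords m = [] := by
    simp only [build_snippets_alt]
    exact collectB_nonpos _ m hm _ _
  intro h; exact hne (h.trans halt)
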